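-- pv_equiv track=rewrite | github.com/asrithaMulugoju/Major_Project | vatmap.py | vmap
-- ===== SOURCE A (Python) =====
-- def vmap(n,RI,Tn):
--     r = int(Tn/n)
--     map = []
--     for i in range(1,r+1):
--         for j in range(0,Tn):
--             if (RI[j]>=n*(i-1) and RI[j]<n*i):
--                 map.append(i)
--     return map
-- ===== SOURCE B (Python) =====
-- def vmap(n, RI, Tn):
--     # One pass + stable sort instead of rescanning RI once per bucket.
--     if n <= 0 or Tn <= 0:
--         return []
--     r = Tn // n
--     if r == 0:
--         return []
--     pairs = sorted((RI[j] // n, j) for j in range(Tn) if 0 <= RI[j] < n * r)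
--     return [b + 1 for b, _ in pairs]
-- ===== Notes on version B (the rewrite author's own statement) =====
-- stated objective: faster
-- what changed: Replaces the r-by-Tn double scan (one full pass over the indices per bucket) with a single pass that floor-divides each in-range value into its bucket, a stable sort of (bucket, index) pairs, and one map to labels.
import Mathlib
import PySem

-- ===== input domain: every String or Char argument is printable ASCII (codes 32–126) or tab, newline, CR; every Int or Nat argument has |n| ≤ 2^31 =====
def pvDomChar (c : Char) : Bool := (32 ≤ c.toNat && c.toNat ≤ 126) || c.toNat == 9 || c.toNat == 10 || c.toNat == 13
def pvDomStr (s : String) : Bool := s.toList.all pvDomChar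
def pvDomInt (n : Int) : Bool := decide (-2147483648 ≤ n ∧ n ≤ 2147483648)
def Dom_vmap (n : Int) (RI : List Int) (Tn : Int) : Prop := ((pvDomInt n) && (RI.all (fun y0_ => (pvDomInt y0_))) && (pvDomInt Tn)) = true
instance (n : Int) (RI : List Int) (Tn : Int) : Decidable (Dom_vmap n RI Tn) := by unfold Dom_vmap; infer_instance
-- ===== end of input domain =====

-- B replaces A's r×Tn double scan by one bucketing pass + a stable sort of (bucket, index)
-- pairs (objective: faster).

-- ===== PORT A =====
-- A's membership test for bucket label i at index j: RI[j] >= n*(i-1) and RI[j] < n*i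
def vmapCond (n : Int) (RI : List Int) (i j : Int) : Bool :=
  decide (PySem.List.pyGetD RI j 0 ≥ n * (i - 1)) && decide (PySem.List.pyGetD RI j 0 < n * i)

-- r = int(Tn/n): truncating division (exact on Dom: |Tn|,|n| ≤ 2^31 < 2^53); n = 0 raises, excluded by Pre_.
-- RI[j] is in range under Pre_ (IndexError otherwise), so pyGetD's default 0 is never read inside Pre_.
def vmap (n : Int) (RI : List Int) (Tn : Int) : List Int :=
  let r := PySem.Int.truncdiv Tn n
  (PySem.List.pyRange 1 (r + 1) 1).foldl (fun map i =>
    (PySem.List.pyRange 0 Tn 1).foldl (fun map j =>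
      if vmapCond n RI i j then map ++ [i] else map) map) []

-- ===== PORT B =====
-- B's one-pass bucketing of index j: keep (RI[j] // n, j) when 0 <= RI[j] < n*r
def vmapPair (n : Int) (RI : List Int) (r j : Int) : Option (Int × Int) :=
  if 0 ≤ PySem.List.pyGetD RI j 0 ∧ PySem.List.pyGetD RI j 0 < n * r
  then some (PySem.Int.floordiv (PySem.List.pyGetD RI j 0) n, j) else none

def vmap_alt (n : Int) (RI : List Int) (Tn : Int) : List Int :=
  if n ≤ 0 ∨ Tn ≤ 0 then []
  else
    let r := PySem.Int.floordiv Tn n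
    if r = 0 then []
    else
      -- sorted(pairs) on tuples = stable sort by fst then snd
      (PySem.List.sorted2 ((PySem.List.pyRange 0 Tn 1).filterMap (vmapPair n RI r))
        Prod.fst Prod.snd).map (fun p => p.1 + 1)

-- ===== PRECONDITION & SPEC =====
-- Pre_ excludes exactly the inputs where Python A raises: n = 0 (ZeroDivisionError in Tn/n), and
-- Tn > len(RI) whenever the outer loop runs at least once (int(Tn/n) ≥ 1), where RI[j] raises IndexError.
def Pre_vmap (n : Int) (RI : List Int) (Tn : Int) : Prop :=
  n ≠ 0 ∧ (1 ≤ PySem.Int.truncdiv Tn n → Tn ≤ (RI.length : Int))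
instance (n : Int) (RI : List Int) (Tn : Int) : Decidable (Pre_vmap n RI Tn) := by
  unfold Pre_vmap; infer_instance
def pvWitness_vmap : Int × List Int × Int := (2, ([0, 3, 1, 5], 4))

def Spec_vmap (n : Int) (RI : List Int) (Tn : Int) (out : List Int) : Prop := out = vmap_alt n RI Tn
instance (n : Int) (RI : List Int) (Tn : Int) (out : List Int) : Decidable (Spec_vmap n RI Tn out) := by unfold Spec_vmap; infer_instance

-- ===== CLAIM (what is proved, stated in full; the proofs are below) =====
def Claim_equal_vmap : Prop := ∀ (n : Int) (RI : List Int) (Tn : Int), Dom_vmap n RI Tn → Pre_vmap n RI Tn → Spec_vmap n RI Tn (vmap n RI Tn)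

-- ===== LEMMAS AND PROOFS =====

-- A's nested loops in filter/flatMap normal form
theorem vmap_norm (n : Int) (RI : List Int) (Tn : Int) :
    vmap n RI Tn =
      (PySem.List.pyRange 1 (PySem.Int.truncdiv Tn n + 1) 1).flatMap (fun i =>
        ((PySem.List.pyRange 0 Tn 1).filter (fun j => vmapCond n RI i j)).map (fun _ => i)) := by
  unfold vmap
  simp only [PySem.List.foldl_append_if (fun j => vmapCond n RI _ j) (fun _ => _),
    PySem.List.foldl_append_eq_flatMap, List.nil_append]

-- Python's tuple comparison: sorted2 by (fst, snd) is sorted with the lexicographic key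
theorem sorted2_lex (xs : List (Int × Int)) :
    PySem.List.sorted2 xs Prod.fst Prod.snd =
      PySem.List.sorted xs (fun p => (toLex p : Lex (Int × Int))) := by
  unfold PySem.List.sorted2 PySem.List.sorted
  simp only [if_neg (by decide : ¬ (false = true))]
  have hb : (fun (a b : Int × Int) =>
        (decide (a.1 < b.1) || (!decide (b.1 < a.1) && decide (a.2 < b.2)))) =
      (fun (a b : Int × Int) => decide ((toLex a : Lex (Int × Int)) < toLex b)) := by
    funext a b
    rcases lt_trichotomy a.1 b.1 with h | h | h
    · simp [Prod.Lex.lt_iff, h, asymm h]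
    · simp [Prod.Lex.lt_iff, h]
    · simp [Prod.Lex.lt_iff, h, asymm h, ne_of_gt h]
  rw [hb]

-- grouping a key-bounded list by key over the range is a permutation of the list
theorem perm_group (xs : List (Int × Int)) (lo hi : Int)
    (h : ∀ p ∈ xs, lo ≤ p.1 ∧ p.1 < hi) :
    ((PySem.List.pyRange lo hi 1).flatMap (fun b => xs.filter (fun p => p.1 == b))).Perm xs := by
  induction xs with
  | nil => simp
  | cons x xs ih =>
    obtain ⟨hlo, hhi⟩ := h x (by simp)
    have hsplit : PySem.List.pyRange lo hi 1 =
        PySem.List.pyRange lo x.1 1 ++ x.1 :: PySem.List.pyRange (x.1 + 1) hi 1 := by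
      rw [PySem.List.pyRange_one_append lo x.1 hi hlo (le_of_lt hhi),
        PySem.List.pyRange_one_cons hhi]
    have hL : ∀ b ∈ PySem.List.pyRange lo x.1 1,
        (x :: xs).filter (fun p => p.1 == b) = xs.filter (fun p => p.1 == b) := by
      intro b hb
      rw [PySem.List.mem_pyRange_one] at hb
      rw [List.filter_cons_of_neg (by simp; omega)]
    have hR : ∀ b ∈ PySem.List.pyRange (x.1 + 1) hi 1,
        (x :: xs).filter (fun p => p.1 == b) = xs.filter (fun p => p.1 == b) := by
      intro b hb
      rw [PySem.List.mem_pyRange_one] at hb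
      rw [List.filter_cons_of_neg (by simp; omega)]
    rw [hsplit, List.flatMap_append, List.flatMap_cons,
      List.flatMap_congr hL, List.flatMap_congr hR,
      List.filter_cons_of_pos (by simp)]
    have ih' := ih (fun p hp => h p (List.mem_cons_of_mem x hp))
    rw [hsplit, List.flatMap_append, List.flatMap_cons] at ih'
    have e : (PySem.List.pyRange lo x.1 1).flatMap (fun b => xs.filter (fun p => p.1 == b)) ++
        (x :: xs.filter (fun p => p.1 == x.1) ++
          (PySem.List.pyRange (x.1 + 1) hi 1).flatMap (fun b => xs.filter (fun p => p.1 == b))) =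
        (PySem.List.pyRange lo x.1 1).flatMap (fun b => xs.filter (fun p => p.1 == b)) ++
        x :: (xs.filter (fun p => p.1 == x.1) ++
          (PySem.List.pyRange (x.1 + 1) hi 1).flatMap (fun b => xs.filter (fun p => p.1 == b))) := by
      simp
    rw [e]
    exact List.perm_middle.trans (List.Perm.cons x ih')

-- the grouped list is strictly increasing in the lexicographic key
theorem pairwise_group (xs : List (Int × Int)) (lo hi : Int)
    (h : xs.Pairwise (fun p q => p.2 < q.2)) :
    ((PySem.List.pyRange lo hi 1).flatMap (fun b => xs.filter (fun p => p.1 == b))).Pairwise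
      (fun p q => (toLex p : Lex (Int × Int)) < toLex q) := by
  rw [List.pairwise_flatMap]
  constructor
  · intro b _
    have := List.Pairwise.filter (R := fun p q : Int × Int => p.2 < q.2) (fun p => p.1 == b) h
    refine this.imp_of_mem ?_
    intro p q hp hq hlt
    have hpb : p.1 = b := by simpa using (List.of_mem_filter hp)
    have hqb : q.1 = b := by simpa using (List.of_mem_filter hq)
    rw [Prod.Lex.lt_iff]
    right
    exact ⟨by simp [hpb, hqb], by simpa using hlt⟩
  · refine (PySem.List.pairwise_lt_pyRange_one lo hi).imp_of_mem ?_
    intro b₁ b₂ _ _ hlt p hp q hq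
    have hpb : p.1 = b₁ := by simpa using (List.of_mem_filter hp)
    have hqb : q.1 = b₂ := by simpa using (List.of_mem_filter hq)
    rw [Prod.Lex.lt_iff]
    left
    simp [hpb, hqb]; omega

-- B's filter + floor-divide bucket test agrees with A's interval test (n > 0, 0 ≤ b, b+1 ≤ r)
theorem bucket_iff (n r b v : Int) (hn : 0 < n) (hb : 0 ≤ b) (hbr : b + 1 ≤ r) :
    ((0 ≤ v ∧ v < n * r) ∧ PySem.Int.floordiv v n = b) ↔ (v ≥ n * (b + 1 - 1) ∧ v < n * (b + 1)) := by
  rw [PySem.Int.floordiv_eq_iff_of_pos hn]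
  constructor
  · rintro ⟨⟨h0, hr⟩, h1, h2⟩
    constructor
    · nlinarith
    · nlinarith
  · rintro ⟨h1, h2⟩
    have hnb : n * (b + 1 - 1) = n * b := by ring
    rw [hnb] at h1
    refine ⟨⟨by nlinarith, by nlinarith⟩, by nlinarith, by nlinarith⟩

-- B's bucket-b slice of the pair list is A's bucket-(b+1) index filter, tagged with b
theorem chunk_eq (n : Int) (RI : List Int) (r b : Int) (hn : 0 < n) (hb : 0 ≤ b)
    (hbr : b + 1 ≤ r) (l : List Int) :
    (l.filterMap (vmapPair n RI r)).filter (fun p => p.1 == b) =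
      (l.filter (fun j => vmapCond n RI (b + 1) j)).map (fun j => (b, j)) := by
  induction l with
  | nil => simp
  | cons j l ih =>
    by_cases hc : 0 ≤ PySem.List.pyGetD RI j 0 ∧ PySem.List.pyGetD RI j 0 < n * r
    · have hsome : vmapPair n RI r j =
          some (PySem.Int.floordiv (PySem.List.pyGetD RI j 0) n, j) := by
        unfold vmapPair; rw [if_pos hc]
      rw [List.filterMap_cons_some hsome]
      by_cases hfb : PySem.Int.floordiv (PySem.List.pyGetD RI j 0) n = b
      · have hA : vmapCond n RI (b + 1) j = true := by
          unfold vmapCond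
          simp only [Bool.and_eq_true, decide_eq_true_eq, ge_iff_le]
          have := (bucket_iff n r b _ hn hb hbr).mp ⟨hc, hfb⟩
          exact ⟨this.1, this.2⟩
        rw [List.filter_cons_of_pos (by simp [hfb]), List.filter_cons_of_pos hA,
          List.map_cons, ih, hfb]
      · have hA : ¬ (vmapCond n RI (b + 1) j = true) := by
          unfold vmapCond
          simp only [Bool.and_eq_true, decide_eq_true_eq, ge_iff_le]
          intro hA'
          exact hfb ((bucket_iff n r b _ hn hb hbr).mpr ⟨hA'.1, hA'.2⟩).2
        rw [List.filter_cons_of_neg (by simp [hfb]), List.filter_cons_of_neg hA, ih]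
    · have hnone : vmapPair n RI r j = none := by
        unfold vmapPair; rw [if_neg hc]
      have hA : ¬ (vmapCond n RI (b + 1) j = true) := by
        unfold vmapCond
        simp only [Bool.and_eq_true, decide_eq_true_eq, ge_iff_le]
        intro hA'
        exact hc ((bucket_iff n r b _ hn hb hbr).mpr ⟨hA'.1, hA'.2⟩).1
      rw [List.filterMap_cons_none hnone, List.filter_cons_of_neg hA, ih]

-- shifting a unit range
theorem pyRange_shift (a b c : Int) :
    (PySem.List.pyRange a b 1).map (fun x => x + c) = PySem.List.pyRange (a + c) (b + c) 1 := by
  rw [PySem.List.pyRange_one, PySem.List.pyRange_one, List.map_map]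
  have : b + c - (a + c) = b - a := by ring
  rw [this]
  exact List.map_congr_left (fun k _ => by simp [Function.comp]; ring)

-- ===== VERDICT (by name: the statement is the Claim_ definition above) =====
theorem vmap_spec : Claim_equal_vmap := by
  intro n RI Tn _ hpre
  obtain ⟨hn0, -⟩ := hpre
  unfold Spec_vmap vmap_alt
  rw [vmap_norm]
  by_cases hn : n ≤ 0
  · -- n < 0: A's interval [n*(i-1), n*i) is empty for every i ≥ 1; B returns [] by its guard
    rw [if_pos (Or.inl hn)]
    rw [List.flatMap_eq_nil_iff]
    intro i hi
    rw [PySem.List.mem_pyRange_one] at hi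
    have : (PySem.List.pyRange 0 Tn 1).filter (fun j => vmapCond n RI i j) = [] := by
      rw [List.filter_eq_nil_iff]
      intro j _
      unfold vmapCond
      simp only [Bool.and_eq_true, decide_eq_true_eq, not_and, not_lt, ge_iff_le]
      intro h1
      nlinarith [lt_of_le_of_ne hn hn0]
    rw [this, List.map_nil]
  · have hnpos : 0 < n := by omega
    by_cases hTn : Tn ≤ 0
    · rw [if_pos (Or.inr hTn)]
      rw [List.flatMap_eq_nil_iff]
      intro i _
      rw [PySem.List.pyRange_one_eq_nil hTn, List.filter_nil, List.map_nil]
    · rw [if_neg (by omega)]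
      have hTn' : 0 ≤ Tn := by omega
      have htf : PySem.Int.truncdiv Tn n = PySem.Int.floordiv Tn n := by
        show Tn.tdiv n = _
        rw [Int.tdiv_eq_ediv_of_nonneg hTn', PySem.Int.floordiv_eq_ediv_of_pos hnpos]
      rw [htf]
      by_cases hr : PySem.Int.floordiv Tn n = 0
      · rw [if_pos hr, hr]
        rw [show (0 : Int) + 1 = 1 by ring, PySem.List.pyRange_one_eq_nil (le_refl 1),
          List.flatMap_nil]
      · rw [if_neg hr]
        set r := PySem.Int.floordiv Tn n with hrdef
        have hr0 : 0 ≤ r := (PySem.Int.le_floordiv_iff_mul_le hnpos).mpr (by omega)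
        have hr1 : 1 ≤ r := by omega
        set xs := (PySem.List.pyRange 0 Tn 1).filterMap (vmapPair n RI r) with hxs
        have hbounds : ∀ p ∈ xs, 0 ≤ p.1 ∧ p.1 < r := by
          intro p hp
          rw [hxs, List.mem_filterMap] at hp
          obtain ⟨j, -, hj⟩ := hp
          unfold vmapPair at hj
          split at hj
          · rename_i hc
            cases hj
            constructor
            · exact (PySem.Int.le_floordiv_iff_mul_le hnpos).mpr (by simpa using hc.1)
            · exact (PySem.Int.floordiv_lt_iff_lt_mul hnpos).mpr (by linarith [hc.2])
          · cases hj
        have hsnd : xs.Pairwise (fun p q => p.2 < q.2) := by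
          rw [hxs]
          refine List.Pairwise.filterMap (vmapPair n RI r) ?_
            ((PySem.List.pairwise_lt_pyRange_one 0 Tn).imp (fun h => h))
          intro a a' haa b hb b' hb'
          unfold vmapPair at hb hb'
          split at hb
          · cases hb
            split at hb'
            · cases hb'; simpa using haa
            · cases hb'
          · cases hb
        rw [sorted2_lex, PySem.List.sorted_eq_of_perm_of_pairwise_lt xs
            ((PySem.List.pyRange 0 r 1).flatMap (fun b => xs.filter (fun p => p.1 == b))) _
            (perm_group xs 0 r hbounds) (pairwise_group xs 0 r hsnd),
          List.map_flatMap]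
        have hshift : PySem.List.pyRange 1 (r + 1) 1 =
            (PySem.List.pyRange 0 r 1).map (fun x => x + 1) := by
          rw [pyRange_shift]; norm_num
        rw [hshift, List.flatMap_map]
        refine List.flatMap_congr ?_
        intro b hb
        rw [PySem.List.mem_pyRange_one] at hb
        rw [hxs, chunk_eq n RI r b hnpos hb.1 (by omega) (PySem.List.pyRange 0 Tn 1),
          List.map_map]
        exact List.map_congr_left (fun j _ => rfl)
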